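-- pv_equiv track=rewrite | github.com/brennon/cs5526-hw1 | nb/tanb.py | cheapest_tree_non_tree_edge
-- ===== SOURCE A (Python) =====
-- def cheapest_tree_non_tree_edge(nodes_in_tree, nodes_not_in_tree, available_edges):
--     valid_edges = []
--     for edge in available_edges:
--         if (edge[0] in nodes_in_tree and edge[1] in nodes_not_in_tree) or (edge[1] in nodes_in_tree and edge[0] in nodes_not_in_tree):
--             valid_edges.append(edge)
--     edge_costs = [edge[2] for edge in valid_edges]
--
--     cheapest_edge = None
--     cheapest_cost = float("inf")
--     for edge in valid_edges:
--         if edge[2] < cheapest_cost: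
--             cheapest_edge = edge
--             cheapest_cost = edge[2]
--
--     return cheapest_edge
-- ===== SOURCE B (Python) =====
-- def cheapest_tree_non_tree_edge(nodes_in_tree, nodes_not_in_tree, available_edges):
--     in_tree = set(nodes_in_tree)
--     out_tree = set(nodes_not_in_tree)
--     candidates = [
--         e for e in available_edges
--         if (e[0] in in_tree and e[1] in out_tree) or (e[1] in in_tree and e[0] in out_tree)
--     ]
--     candidates.sort(key=lambda e: e[2])
--     return candidates[0] if candidates else None
-- ===== Notes on version B (the rewrite author's own statement) =====
-- stated objective: alternative
-- what changed: Replaces A's filter-then-strict-<-argmin scan with set-based membership, a list-comprehension filter and a stable sort by cost, returning the first candidate of the sorted list (stability preserves A's earliest-minimum tie-break).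
import Mathlib
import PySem

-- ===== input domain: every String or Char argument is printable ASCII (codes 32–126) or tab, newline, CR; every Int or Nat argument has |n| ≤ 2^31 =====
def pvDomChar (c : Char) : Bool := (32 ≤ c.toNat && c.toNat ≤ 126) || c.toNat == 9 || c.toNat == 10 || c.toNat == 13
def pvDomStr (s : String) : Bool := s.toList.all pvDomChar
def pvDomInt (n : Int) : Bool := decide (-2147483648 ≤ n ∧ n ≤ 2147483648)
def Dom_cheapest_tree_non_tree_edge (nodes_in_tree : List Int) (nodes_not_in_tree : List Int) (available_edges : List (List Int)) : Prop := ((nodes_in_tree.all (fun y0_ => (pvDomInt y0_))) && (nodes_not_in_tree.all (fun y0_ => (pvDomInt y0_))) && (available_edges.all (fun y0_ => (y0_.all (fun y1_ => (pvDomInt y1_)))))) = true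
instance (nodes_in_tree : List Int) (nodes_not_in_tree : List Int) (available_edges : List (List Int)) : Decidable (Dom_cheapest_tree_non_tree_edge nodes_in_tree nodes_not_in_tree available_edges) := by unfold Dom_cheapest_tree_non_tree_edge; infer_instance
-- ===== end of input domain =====

-- ===== PORT A =====
-- B replaces A's filter-then-strict-<-argmin scan with a set-backed filter, a stable
-- sort by cost and first-element extraction (objective: alternative decomposition).
-- A-side helper: the crossing test from A's loop condition.
def pvCrossA (nodes_in_tree nodes_not_in_tree : List Int) (e : List Int) : Bool :=
  (nodes_in_tree.contains (PySem.List.pyGetD e 0 0) && nodes_not_in_tree.contains (PySem.List.pyGetD e 1 0)) ||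
  (nodes_in_tree.contains (PySem.List.pyGetD e 1 0) && nodes_not_in_tree.contains (PySem.List.pyGetD e 0 0))

def cheapest_tree_non_tree_edge (nodes_in_tree : List Int) (nodes_not_in_tree : List Int) (available_edges : List (List Int)) : Option (List Int) :=
  let valid_edges := available_edges.foldl
    (fun acc e => if pvCrossA nodes_in_tree nodes_not_in_tree e then acc ++ [e] else acc) []
  let _edge_costs := valid_edges.map (fun e => PySem.List.pyGetD e 2 0)
  -- cheapest_cost = float("inf") is modelled as 'none'; once set it is 'some cost'.
  let r := valid_edges.foldl
    (fun (st : Option (List Int) × Option Int) e =>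
      match st.2 with
      | none => (some e, some (PySem.List.pyGetD e 2 0))
      | some c =>
        if PySem.List.pyGetD e 2 0 < c then (some e, some (PySem.List.pyGetD e 2 0)) else st)
    (none, none)
  r.1

-- ===== PORT B =====
-- B-side helper: the crossing test against the two sets.
def pvCrossB (in_tree out_tree : PySem.Set Int) (e : List Int) : Bool :=
  (PySem.Set.contains in_tree (PySem.List.pyGetD e 0 0) && PySem.Set.contains out_tree (PySem.List.pyGetD e 1 0)) ||
  (PySem.Set.contains in_tree (PySem.List.pyGetD e 1 0) && PySem.Set.contains out_tree (PySem.List.pyGetD e 0 0))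

def cheapest_tree_non_tree_edge_alt (nodes_in_tree : List Int) (nodes_not_in_tree : List Int) (available_edges : List (List Int)) : Option (List Int) :=
  let in_tree := PySem.Set.ofList nodes_in_tree
  let out_tree := PySem.Set.ofList nodes_not_in_tree
  let candidates := available_edges.filter (fun e => pvCrossB in_tree out_tree e)
  (PySem.List.sorted candidates (fun e => PySem.List.pyGetD e 2 0)).head?

-- ===== PRECONDITION & SPEC =====
-- Pre_ excludes exactly the inputs where Python A raises IndexError: every edge must
-- have at least the two endpoints (edge[0], edge[1] are read for every edge), and every
-- crossing edge must also carry its cost (edge[2] is read only for crossing edges).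
def Pre_cheapest_tree_non_tree_edge (nodes_in_tree : List Int) (nodes_not_in_tree : List Int) (available_edges : List (List Int)) : Prop :=
  ∀ e ∈ available_edges, 2 ≤ e.length ∧
    (((e.getD 0 0 ∈ nodes_in_tree ∧ e.getD 1 0 ∈ nodes_not_in_tree) ∨
      (e.getD 1 0 ∈ nodes_in_tree ∧ e.getD 0 0 ∈ nodes_not_in_tree)) → 3 ≤ e.length)
instance (nodes_in_tree : List Int) (nodes_not_in_tree : List Int) (available_edges : List (List Int)) : Decidable (Pre_cheapest_tree_non_tree_edge nodes_in_tree nodes_not_in_tree available_edges) := by unfold Pre_cheapest_tree_non_tree_edge; infer_instance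

def pvWitness_cheapest_tree_non_tree_edge : List Int × List Int × List (List Int) :=
  ([1, 2], [3, 4], [[1, 3, 5], [2, 4, 2], [3, 4, 9]])

def Spec_cheapest_tree_non_tree_edge (nodes_in_tree : List Int) (nodes_not_in_tree : List Int) (available_edges : List (List Int)) (out : Option (List Int)) : Prop := out = cheapest_tree_non_tree_edge_alt nodes_in_tree nodes_not_in_tree available_edges
instance (nodes_in_tree : List Int) (nodes_not_in_tree : List Int) (available_edges : List (List Int)) (out : Option (List Int)) : Decidable (Spec_cheapest_tree_non_tree_edge nodes_in_tree nodes_not_in_tree available_edges out) := by unfold Spec_cheapest_tree_non_tree_edge; infer_instance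

-- ===== CLAIM (what is proved, stated in full; the proofs are below) =====
def Claim_equal_cheapest_tree_non_tree_edge : Prop := ∀ (nodes_in_tree : List Int) (nodes_not_in_tree : List Int) (available_edges : List (List Int)), Dom_cheapest_tree_non_tree_edge nodes_in_tree nodes_not_in_tree available_edges → Pre_cheapest_tree_non_tree_edge nodes_in_tree nodes_not_in_tree available_edges → Spec_cheapest_tree_non_tree_edge nodes_in_tree nodes_not_in_tree available_edges (cheapest_tree_non_tree_edge nodes_in_tree nodes_not_in_tree available_edges)

-- ===== LEMMAS AND PROOFS =====

-- set(xs) membership agrees with list membership.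
theorem pvContains_ofList (T : List Int) (x : Int) :
    PySem.Set.contains (PySem.Set.ofList T) x = T.contains x := by
  rw [Bool.eq_iff_iff]; simp [PySem.Set.mem_ofList]

-- The two crossing tests agree.
theorem pvCross_eq (T N : List Int) (e : List Int) :
    pvCrossA T N e = pvCrossB (PySem.Set.ofList T) (PySem.Set.ofList N) e := by
  simp only [pvCrossA, pvCrossB, pvContains_ofList]

-- A's argmin fold, once the state carries an edge b and its cost k b, computes the
-- strict-< running minimum starting from b.
theorem pvFoldA_some (k : List Int → Int) (l : List (List Int)) :
    ∀ b : List Int,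
      (l.foldl
        (fun (st : Option (List Int) × Option Int) e =>
          match st.2 with
          | none => (some e, some (k e))
          | some c => if k e < c then (some e, some (k e)) else st)
        (some b, some (k b))).1
      = some (l.foldl (fun best e => if k e < k best then e else best) b) := by
  induction l with
  | nil => intro b; rfl
  | cons x t ih =>
    intro b
    by_cases h : k x < k b
    · simp only [List.foldl_cons, h]
      exact ih x
    · simp only [List.foldl_cons, if_neg h]
      exact ih b

-- One insertion step of the stable insertion sort, on a nonempty accumulator.
theorem pvInsertBy_cons (bef : List Int → List Int → Bool) (x y : List Int) (ys : List (List Int)) :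
    PySem.List.insertBy bef x (y :: ys)
      = if bef x y then x :: y :: ys else y :: PySem.List.insertBy bef x ys := by
  simp [PySem.List.insertBy]

-- Folding insertions into an accumulator whose head is b yields as head the strict-<
-- running minimum starting from b (stability: ties keep the earlier element b).
theorem pvFoldInsert_head (k : List Int → Int) (l : List (List Int)) :
    ∀ (acc : List (List Int)) (b : List Int), acc.head? = some b →
      ((l.foldl
        (fun a x => PySem.List.insertBy (fun p q => decide (k p < k q)) x a) acc).head?)
      = some (l.foldl (fun best e => if k e < k best then e else best) b) := by
  induction l with
  | nil => intro acc b h; simpa using h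
  | cons x t ih =>
    intro acc b h
    cases acc with
    | nil => simp at h
    | cons b0 ys =>
      have hb : b0 = b := by simpa using h
      subst hb
      simp only [List.foldl_cons]
      rw [pvInsertBy_cons]
      by_cases hlt : k x < k b0
      · rw [if_pos (by simpa using hlt), if_pos hlt]
        exact ih (x :: b0 :: ys) x rfl
      · rw [if_neg (by simpa using hlt), if_neg hlt]
        exact ih (b0 :: PySem.List.insertBy (fun p q => decide (k p < k q)) x ys) b0 rfl

-- Head of the stable sort equals A's strict-< argmin fold.
theorem pvArgmin_eq_sorted_head (k : List Int → Int) (l : List (List Int)) :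
    (l.foldl
      (fun (st : Option (List Int) × Option Int) e =>
        match st.2 with
        | none => (some e, some (k e))
        | some c => if k e < c then (some e, some (k e)) else st)
      (none, none)).1
    = (PySem.List.sorted l k).head? := by
  cases l with
  | nil => rfl
  | cons v vs =>
    rw [PySem.List.sorted_eq_foldl_insertBy]
    simp only [List.foldl_cons]
    rw [pvFoldA_some k vs v]
    rw [show PySem.List.insertBy (fun a b => decide (k a < k b)) v ([] : List (List Int)) = [v] from rfl]
    exact (pvFoldInsert_head k vs [v] v rfl).symm

-- ===== VERDICT (by name: the statement is the Claim_ definition above) =====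
theorem cheapest_tree_non_tree_edge_spec : Claim_equal_cheapest_tree_non_tree_edge := by
  intro T N es _ _
  unfold Spec_cheapest_tree_non_tree_edge
  unfold cheapest_tree_non_tree_edge cheapest_tree_non_tree_edge_alt
  simp only [PySem.List.foldl_append_if (f := fun e => e) (p := pvCrossA T N), List.map_id_fun',
    List.nil_append]
  rw [List.filter_congr (fun e _ => (pvCross_eq T N e).symm)]
  exact pvArgmin_eq_sorted_head (fun e => PySem.List.pyGetD e 2 0) _
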